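-- pv_equiv track=rewrite | github.com/serweryn617/picontrol | package/picontrol.py | make_gpio_masks
-- ===== SOURCE A (Python) =====
-- def make_gpio_masks(gpios_on, gpios_off):
--     pin_mask = 0
--     pin_values = 0
--
--     if gpios_on:
--         for pin in gpios_on:
--             pin_mask |= 1 << pin
--             pin_values |= 1 << pin
--
--     if gpios_off:
--         for pin in gpios_off:
--             pin_mask |= 1 << pin
--             pin_values &= ~(1 << pin)
--
--     return pin_mask, pin_values
-- ===== SOURCE B (Python) =====
-- def make_gpio_masks(gpios_on, gpios_off):
--     on = set(gpios_on or ())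
--     off = set(gpios_off or ())
--     pin_mask = sum(1 << pin for pin in on | off)
--     pin_values = sum(1 << pin for pin in on - off)
--     return pin_mask, pin_values
-- ===== Notes on version B (the rewrite author's own statement) =====
-- stated objective: simpler
-- what changed: Replaces A's order-dependent set-bit/clear-bit fold (OR into both masks, then OR the mask and AND-NOT the values per off pin) with set algebra: pin_mask is the sum of 1<<p over set(on) | set(off) and pin_values the sum over set(on) - set(off), eliminating the clearing step entirely.
import Mathlib
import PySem

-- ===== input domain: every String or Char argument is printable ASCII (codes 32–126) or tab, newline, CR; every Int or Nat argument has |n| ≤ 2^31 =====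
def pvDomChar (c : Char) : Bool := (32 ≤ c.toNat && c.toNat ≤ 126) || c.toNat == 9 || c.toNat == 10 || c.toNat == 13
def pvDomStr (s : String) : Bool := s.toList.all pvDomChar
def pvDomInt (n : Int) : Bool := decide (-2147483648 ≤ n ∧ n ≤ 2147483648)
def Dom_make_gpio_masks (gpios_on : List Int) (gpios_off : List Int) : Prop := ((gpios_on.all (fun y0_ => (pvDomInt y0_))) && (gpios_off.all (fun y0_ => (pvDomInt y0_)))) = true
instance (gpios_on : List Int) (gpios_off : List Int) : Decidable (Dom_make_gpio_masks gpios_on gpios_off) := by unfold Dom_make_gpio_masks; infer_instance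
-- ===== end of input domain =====

-- B replaces A's order-dependent set-bit/clear-bit fold by set algebra: mask = sum of 1<<p over
-- set(on) | set(off), values = sum of 1<<p over set(on) - set(off); objective: simpler.

-- ===== PORT A =====
-- '|=' / '&=' are PySem.Int.bor / PySem.Int.band, '~' is Int.not;
-- '1 << pin' is (1:Int) <<< pin.toNat — exact for 0 ≤ pin (Pre_ requires it: Python raises
-- ValueError on a negative shift count).
def make_gpio_masks (gpios_on : List Int) (gpios_off : List Int) : Int × Int :=
  let pin_mask : Int := 0
  let pin_values : Int := 0
  let s1 : Int × Int :=
    if gpios_on ≠ [] then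
      gpios_on.foldl (fun s pin =>
        (PySem.Int.bor s.1 (Int.shiftLeft 1 pin.toNat),
         PySem.Int.bor s.2 (Int.shiftLeft 1 pin.toNat))) (pin_mask, pin_values)
    else (pin_mask, pin_values)
  let s2 : Int × Int :=
    if gpios_off ≠ [] then
      gpios_off.foldl (fun s pin =>
        (PySem.Int.bor s.1 (Int.shiftLeft 1 pin.toNat),
         PySem.Int.band s.2 (Int.not (Int.shiftLeft 1 pin.toNat)))) s1
    else s1
  s2

-- ===== PORT B =====
-- sums over a Set are iteration-order independent, so folding the Set's list is exact
def make_gpio_masks_alt (gpios_on : List Int) (gpios_off : List Int) : Int × Int :=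
  let on := PySem.Set.ofList gpios_on
  let off := PySem.Set.ofList gpios_off
  let pin_mask : Int := (PySem.Set.union on off).foldl (fun acc pin => acc + (Int.shiftLeft 1 pin.toNat)) 0
  let pin_values : Int := (PySem.Set.diff on off).foldl (fun acc pin => acc + (Int.shiftLeft 1 pin.toNat)) 0
  (pin_mask, pin_values)

-- ===== PRECONDITION & SPEC =====
-- Pre_ excludes negative pins: on them Python's '1 << pin' raises ValueError in both A and B.
def Pre_make_gpio_masks (gpios_on : List Int) (gpios_off : List Int) : Prop :=
  (∀ p ∈ gpios_on, 0 ≤ p) ∧ (∀ p ∈ gpios_off, 0 ≤ p)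
instance (gpios_on : List Int) (gpios_off : List Int) : Decidable (Pre_make_gpio_masks gpios_on gpios_off) := by unfold Pre_make_gpio_masks; infer_instance
def pvWitness_make_gpio_masks : List Int × List Int := ([2, 3], [3, 5])

def Spec_make_gpio_masks (gpios_on : List Int) (gpios_off : List Int) (out : Int × Int) : Prop := out = make_gpio_masks_alt gpios_on gpios_off
instance (gpios_on : List Int) (gpios_off : List Int) (out : Int × Int) : Decidable (Spec_make_gpio_masks gpios_on gpios_off out) := by unfold Spec_make_gpio_masks; infer_instance

-- ===== CLAIM (what is proved, stated in full; the proofs are below) =====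
def Claim_equal_make_gpio_masks : Prop := ∀ (gpios_on : List Int) (gpios_off : List Int), Dom_make_gpio_masks gpios_on gpios_off → Pre_make_gpio_masks gpios_on gpios_off → Spec_make_gpio_masks gpios_on gpios_off (make_gpio_masks gpios_on gpios_off)

-- ===== LEMMAS AND PROOFS =====

-- Nat-level shapes of the two computations
def pvNatOr (l : List Nat) (a : Nat) : Nat := l.foldl (fun a p => a ||| (1 <<< p)) a
def pvNatClr (l : List Nat) (a : Nat) : Nat := l.foldl (fun a p => Nat.ldiff a (1 <<< p)) a
def pvNatSum (l : List Nat) : Nat := (l.map (fun p => 1 <<< p)).sum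

-- adding a two-power into a number whose bit p is clear is a bitwise or
theorem pv_tb_add_pow (V p : Nat) (h : V.testBit p = false) (j : Nat) :
    (2 ^ p + V).testBit j = ((2 ^ p).testBit j || V.testBit j) := by
  have hV : 2 ^ (p+1) * (V / 2 ^ (p+1)) + V % 2 ^ (p+1) = V := Nat.div_add_mod V _
  have hlo2 : V % 2 ^ (p+1) < 2 ^ (p+1) := Nat.mod_lt _ (Nat.two_pow_pos _)
  have hlobit : (V % 2 ^ (p+1)).testBit p = false := by
    rw [Nat.testBit_mod_two_pow]; simp [h]
  have hlo : V % 2 ^ (p+1) < 2 ^ p := by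
    by_contra hge
    push Not at hge
    have := Nat.testBit_of_two_pow_le_and_two_pow_add_one_gt hge (by omega)
    simp [this] at hlobit
  have hpow : 2 ^ (p+1) = 2 * 2 ^ p := by ring
  have h2 : 2 ^ p + V = 2 ^ (p+1) * (V / 2 ^ (p+1)) + (2 ^ p + V % 2 ^ (p+1)) := by omega
  rw [h2, Nat.testBit_two_pow_mul_add _ (by omega) j]
  conv_rhs => rw [← hV]
  rw [Nat.testBit_two_pow_mul_add _ (by omega) j]
  rcases lt_trichotomy j p with hj | rfl | hj
  · rw [if_pos (by omega), if_pos (by omega), Nat.testBit_two_pow_add_gt hj,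
      Nat.testBit_two_pow_of_ne (by omega)]
    simp
  · rw [if_pos (by omega), if_pos (by omega), Nat.testBit_two_pow_add_eq, hlobit,
      Nat.testBit_two_pow_self]
    simp
  · rw [if_neg (by omega), if_neg (by omega), Nat.testBit_two_pow_of_ne (by omega)]
    simp

theorem pv_clr_eq (v p : Nat) : v - (v &&& 2 ^ p) = Nat.ldiff v (2 ^ p) := by
  rw [Nat.and_two_pow]
  cases h : v.testBit p
  · simp only [Bool.toNat_false, Nat.zero_mul, Nat.sub_zero]
    apply Nat.eq_of_testBit_eq
    intro j
    rw [Nat.testBit_ldiff, Nat.testBit_two_pow]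
    rcases eq_or_ne p j with rfl | hne
    · simp [h]
    · simp [hne]
  · simp only [Bool.toNat_true, Nat.one_mul]
    have hbit : (Nat.ldiff v (2 ^ p)).testBit p = false := by
      simp [Nat.testBit_ldiff]
    have hsum : 2 ^ p + Nat.ldiff v (2 ^ p) = v := by
      apply Nat.eq_of_testBit_eq
      intro j
      rw [pv_tb_add_pow _ _ hbit, Nat.testBit_ldiff, Nat.testBit_two_pow]
      rcases eq_or_ne p j with rfl | hne
      · simp [h]
      · simp [hne]
    omega

theorem pv_tb_or (l : List Nat) (a k : Nat) :
    (pvNatOr l a).testBit k = (a.testBit k || decide (k ∈ l)) := by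
  induction l generalizing a with
  | nil => simp [pvNatOr]
  | cons p t ih =>
    simp only [pvNatOr, List.foldl_cons] at *
    rw [ih, Nat.testBit_lor, Nat.one_shiftLeft, Nat.testBit_two_pow]
    rcases eq_or_ne p k with rfl | hne
    · simp
    · simp [hne, Ne.symm hne]

theorem pv_tb_clr (l : List Nat) (a k : Nat) :
    (pvNatClr l a).testBit k = (a.testBit k && !decide (k ∈ l)) := by
  induction l generalizing a with
  | nil => simp [pvNatClr]
  | cons p t ih =>
    simp only [pvNatClr, List.foldl_cons] at *
    rw [ih, Nat.testBit_ldiff, Nat.one_shiftLeft, Nat.testBit_two_pow]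
    rcases eq_or_ne p k with rfl | hne
    · simp
    · simp [hne, Ne.symm hne]

theorem pv_tb_sum (l : List Nat) (hnd : l.Nodup) (k : Nat) :
    (pvNatSum l).testBit k = decide (k ∈ l) := by
  induction l generalizing k with
  | nil => simp [pvNatSum]
  | cons p t ih =>
    rcases List.nodup_cons.mp hnd with ⟨hp, ht⟩
    have hbit : (pvNatSum t).testBit p = false := by
      rw [ih ht]; simp [hp]
    simp only [pvNatSum, List.map_cons, List.sum_cons, Nat.one_shiftLeft] at *
    rw [pv_tb_add_pow _ _ hbit, ih ht, Nat.testBit_two_pow]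
    rcases eq_or_ne p k with rfl | hne
    · simp
    · simp [hne, Ne.symm hne]

-- cast lemmas: the Int folds of the two ports are casts of the Nat shapes
theorem pv_bor_cast (a n : Nat) :
    PySem.Int.bor (a : Int) (Int.shiftLeft 1 n) = ((a ||| (1 <<< n) : Nat) : Int) := by
  have h : Int.shiftLeft 1 n = (((1 <<< n : Nat)) : Int) := rfl
  rw [h, PySem.Int.bor_natCast]

theorem pv_band_cast (a n : Nat) :
    PySem.Int.band (a : Int) (Int.not (Int.shiftLeft 1 n)) = ((Nat.ldiff a (1 <<< n) : Nat) : Int) := by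
  have h : Int.not (Int.shiftLeft 1 n) = Int.negSucc (1 <<< n) := rfl
  rw [h]
  have h2 : PySem.Int.band (a : Int) (Int.negSucc (1 <<< n)) = ((a - (a &&& (1 <<< n)) : Nat) : Int) := by
    simp [PySem.Int.band]
    norm_cast
  rw [h2, Nat.one_shiftLeft, pv_clr_eq, ← Nat.one_shiftLeft]

theorem pv_castA_on (l : List Int) (m v : Nat) :
    l.foldl (fun s pin =>
        (PySem.Int.bor s.1 (Int.shiftLeft 1 pin.toNat),
         PySem.Int.bor s.2 (Int.shiftLeft 1 pin.toNat))) ((m : Int), (v : Int))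
      = (((pvNatOr (l.map Int.toNat) m : Nat) : Int), ((pvNatOr (l.map Int.toNat) v : Nat) : Int)) := by
  induction l generalizing m v with
  | nil => simp [pvNatOr]
  | cons p t ih =>
    simp only [List.foldl_cons, List.map_cons, pvNatOr] at *
    rw [pv_bor_cast, pv_bor_cast, ih]

theorem pv_castA_off (l : List Int) (m v : Nat) :
    l.foldl (fun s pin =>
        (PySem.Int.bor s.1 (Int.shiftLeft 1 pin.toNat),
         PySem.Int.band s.2 (Int.not (Int.shiftLeft 1 pin.toNat)))) ((m : Int), (v : Int))
      = (((pvNatOr (l.map Int.toNat) m : Nat) : Int), ((pvNatClr (l.map Int.toNat) v : Nat) : Int)) := by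
  induction l generalizing m v with
  | nil => simp [pvNatOr, pvNatClr]
  | cons p t ih =>
    simp only [List.foldl_cons, List.map_cons, pvNatOr, pvNatClr] at *
    rw [pv_bor_cast, pv_band_cast, ih]

theorem pv_castB (l : List Int) (a : Nat) :
    l.foldl (fun acc pin => acc + (Int.shiftLeft 1 pin.toNat)) (a : Int)
      = ((a + pvNatSum (l.map Int.toNat) : Nat) : Int) := by
  induction l generalizing a with
  | nil => simp [pvNatSum]
  | cons p t ih =>
    simp only [List.foldl_cons, List.map_cons, pvNatSum, List.sum_cons] at *
    have hs : Int.shiftLeft 1 p.toNat = (((1 <<< p.toNat : Nat)) : Int) := rfl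
    have h : (a : Int) + Int.shiftLeft 1 p.toNat = ((a + (1 <<< p.toNat) : Nat) : Int) := by
      rw [hs]; push_cast; ring
    rw [h, ih]
    congr 1
    omega

-- ===== VERDICT (by name: the statement is the Claim_ definition above) =====
-- 'if xs:' around a for-loop is a no-op: the fold over [] is the initial state
theorem pv_ite_fold {α β : Type} (l : List α) (f : β → α → β) (s : β) :
    (if l ≠ [] then l.foldl f s else s) = l.foldl f s := by
  cases l <;> simp

theorem pv_memmap (l : List Int) (h : ∀ p ∈ l, 0 ≤ p) (k : Nat) :
    k ∈ l.map Int.toNat ↔ (k : Int) ∈ l := by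
  simp only [List.mem_map]
  constructor
  · rintro ⟨x, hx, rfl⟩
    rwa [Int.toNat_of_nonneg (h x hx)]
  · intro hk
    exact ⟨(k : Int), hk, by simp⟩

theorem pv_nodup_map (l : List Int) (h : ∀ p ∈ l, 0 ≤ p) (hnd : l.Nodup) :
    (l.map Int.toNat).Nodup := by
  refine hnd.map_on ?_
  intro x hx y hy hxy
  have := Int.toNat_of_nonneg (h x hx)
  have := Int.toNat_of_nonneg (h y hy)
  omega

theorem make_gpio_masks_spec : Claim_equal_make_gpio_masks := by
  intro gon goff hdom hpre
  obtain ⟨hon, hoff⟩ := hpre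
  unfold Spec_make_gpio_masks make_gpio_masks make_gpio_masks_alt
  simp only [pv_ite_fold]
  rw [show ((0:Int), (0:Int)) = (((0:Nat) : Int), ((0:Nat) : Int)) from rfl,
    pv_castA_on, pv_castA_off]
  have hB1 := pv_castB (PySem.Set.union (PySem.Set.ofList gon) (PySem.Set.ofList goff)) 0
  have hB2 := pv_castB (PySem.Set.diff (PySem.Set.ofList gon) (PySem.Set.ofList goff)) 0
  simp only [Nat.cast_zero] at hB1 hB2
  rw [hB1, hB2]
  -- membership facts
  have honS : ∀ p ∈ PySem.Set.ofList gon, (0:Int) ≤ p := by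
    intro p hp; exact hon p ((PySem.Set.mem_ofList _ _).mp hp)
  have hoffS : ∀ p ∈ PySem.Set.ofList goff, (0:Int) ≤ p := by
    intro p hp; exact hoff p ((PySem.Set.mem_ofList _ _).mp hp)
  have hU : ∀ p ∈ PySem.Set.union (PySem.Set.ofList gon) (PySem.Set.ofList goff), (0:Int) ≤ p := by
    intro p hp
    rcases (PySem.Set.mem_union _ _ _).mp hp with h' | h'
    · exact honS p h'
    · exact hoffS p h'
  have hD : ∀ p ∈ PySem.Set.diff (PySem.Set.ofList gon) (PySem.Set.ofList goff), (0:Int) ≤ p := by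
    intro p hp
    exact honS p ((PySem.Set.mem_diff _ _ _).mp hp).1
  have hUnd : ((PySem.Set.union (PySem.Set.ofList gon) (PySem.Set.ofList goff)).map Int.toNat).Nodup :=
    pv_nodup_map _ hU (PySem.Set.nodup_union _ _ (PySem.Set.nodup_ofList gon))
  have hDnd : ((PySem.Set.diff (PySem.Set.ofList gon) (PySem.Set.ofList goff)).map Int.toNat).Nodup :=
    pv_nodup_map _ hD (PySem.Set.nodup_diff _ _ (PySem.Set.nodup_ofList gon))
  have hmemU : ∀ k : Nat, k ∈ (PySem.Set.union (PySem.Set.ofList gon) (PySem.Set.ofList goff)).map Int.toNat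
      ↔ (k ∈ gon.map Int.toNat ∨ k ∈ goff.map Int.toNat) := by
    intro k
    rw [pv_memmap _ hU, pv_memmap _ hon, pv_memmap _ hoff, PySem.Set.mem_union _ _ _,
      PySem.Set.mem_ofList _ _, PySem.Set.mem_ofList _ _]
  have hmemD : ∀ k : Nat, k ∈ (PySem.Set.diff (PySem.Set.ofList gon) (PySem.Set.ofList goff)).map Int.toNat
      ↔ (k ∈ gon.map Int.toNat ∧ ¬ k ∈ goff.map Int.toNat) := by
    intro k
    rw [pv_memmap _ hD, pv_memmap _ hon, pv_memmap _ hoff, PySem.Set.mem_diff _ _ _,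
      PySem.Set.mem_ofList _ _, PySem.Set.mem_ofList _ _]
  refine Prod.ext ?_ ?_
  · show ((pvNatOr (goff.map Int.toNat) (pvNatOr (gon.map Int.toNat) 0) : Nat) : Int)
        = ((0 + pvNatSum ((PySem.Set.union (PySem.Set.ofList gon) (PySem.Set.ofList goff)).map Int.toNat) : Nat) : Int)
    congr 1
    apply Nat.eq_of_testBit_eq
    intro k
    rw [Nat.zero_add, pv_tb_or, pv_tb_or, pv_tb_sum _ hUnd, Nat.zero_testBit]
    apply Bool.eq_iff_iff.mpr
    simp only [Bool.false_or, Bool.or_eq_true, decide_eq_true_eq]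
    exact (hmemU k).symm
  · show ((pvNatClr (goff.map Int.toNat) (pvNatOr (gon.map Int.toNat) 0) : Nat) : Int)
        = ((0 + pvNatSum ((PySem.Set.diff (PySem.Set.ofList gon) (PySem.Set.ofList goff)).map Int.toNat) : Nat) : Int)
    congr 1
    apply Nat.eq_of_testBit_eq
    intro k
    rw [Nat.zero_add, pv_tb_clr, pv_tb_or, pv_tb_sum _ hDnd, Nat.zero_testBit]
    apply Bool.eq_iff_iff.mpr
    simp only [Bool.and_eq_true, Bool.not_eq_true', Bool.false_or,
      decide_eq_true_eq, decide_eq_false_iff_not]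
    exact (hmemD k).symm
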